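-- pv_equiv track=rewrite | github.com/zhangj1an/vllm-omni | vllm_omni/quantization/inc_config.py | _map_with_stage_prefix
-- ===== SOURCE A (Python) =====
-- def _map_with_stage_prefix(
--     items: list[str],
--     prefix_map: dict[str, str | None],
--     stage: str,
-- ) -> list[str]:
--     """Apply *prefix_map* to each item and prepend *stage* to mapped items."""
--     sorted_keys = sorted(prefix_map, key=len, reverse=True)
--     result: list[str] = []
--     for item in items:
--         new_item = item
--         for orig in sorted_keys:
--             if item.startswith(orig):
--                 new_val = prefix_map[orig] or ""
--                 new_item = stage + new_val + item[len(orig) :]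
--                 break
--         result.append(new_item)
--     return result
-- ===== SOURCE B (Python) =====
-- def _map_with_stage_prefix(
--     items: list[str],
--     prefix_map: dict[str, str | None],
--     stage: str,
-- ) -> list[str]:
--     """Apply *prefix_map* to each item and prepend *stage* to mapped items.
--
--     Longest-prefix match by hashing each prefix of the item (longest first)
--     instead of scanning the whole sorted key list per item.
--     """
--     def map_one(item: str) -> str:
--         for j in range(len(item), -1, -1):
--             p = item[:j]
--             if p in prefix_map:
--                 return stage + (prefix_map[p] or "") + item[j:]
--         return item
--     return [map_one(item) for item in items]
-- ===== Notes on version B (the rewrite author's own statement) =====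
-- stated objective: faster
-- what changed: Instead of sorting all keys by length and scanning the whole sorted key list for each item, B hashes each prefix of the item itself, longest first, so per-item work depends on the item's length rather than on the number of keys.
import Mathlib
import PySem

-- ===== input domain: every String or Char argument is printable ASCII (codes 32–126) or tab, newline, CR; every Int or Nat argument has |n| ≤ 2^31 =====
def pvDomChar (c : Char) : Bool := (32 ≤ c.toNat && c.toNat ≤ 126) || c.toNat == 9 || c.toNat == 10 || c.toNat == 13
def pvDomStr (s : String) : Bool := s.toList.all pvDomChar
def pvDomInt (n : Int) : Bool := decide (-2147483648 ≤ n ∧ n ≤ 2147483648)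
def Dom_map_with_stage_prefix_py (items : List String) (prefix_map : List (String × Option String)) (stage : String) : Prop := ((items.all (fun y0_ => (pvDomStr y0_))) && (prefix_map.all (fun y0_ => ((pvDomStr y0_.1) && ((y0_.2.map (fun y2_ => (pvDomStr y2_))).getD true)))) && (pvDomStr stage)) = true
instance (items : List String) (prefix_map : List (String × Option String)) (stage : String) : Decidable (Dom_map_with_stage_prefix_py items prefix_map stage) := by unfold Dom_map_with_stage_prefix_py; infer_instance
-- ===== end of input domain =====

-- B replaces A's per-item scan over all (length-sorted) keys by hash lookups of the item's own
-- prefixes, longest first, so the work per item no longer grows with the number of keys.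

-- ===== PORT A =====
-- inner 'for orig in sorted_keys: …' loop of A (returns on the first matching prefix, breaking)
def pvScanA (d : PySem.Dict String (Option String)) (stage item : String) : List String → String
  | [] => item
  | orig :: rest =>
      if PySem.Str.startswith item orig then
        stage ++ ((d.getD orig none).getD "") ++ PySem.Str.slice item (some (PySem.Str.len orig)) none
      else pvScanA d stage item rest

def map_with_stage_prefix_py (items : List String) (prefix_map : List (String × Option String)) (stage : String) : List String :=
  let d := PySem.Dict.ofList prefix_map
  let sorted_keys := PySem.List.sorted d.keys (fun k => PySem.Str.len k) true
  items.foldl (fun result item => result ++ [pvScanA d stage item sorted_keys]) []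

-- ===== PORT B =====
-- the returned value when the prefix item[:j] is found in the map (B's 'return' line)
def pvHitB (d : PySem.Dict String (Option String)) (stage item : String) (j : Nat) : String :=
  stage ++ ((d.getD (PySem.Str.slice item none (some (j : Int))) none).getD "")
    ++ PySem.Str.slice item (some (j : Int)) none

-- B's 'for j in range(len(item), -1, -1)' loop, j counting down
def pvMapOne (d : PySem.Dict String (Option String)) (stage item : String) : Nat → String
  | 0 =>
      if d.contains (PySem.Str.slice item none (some ((0 : Nat) : Int))) then pvHitB d stage item 0
      else item
  | j + 1 =>
      if d.contains (PySem.Str.slice item none (some ((j + 1 : Nat) : Int))) then pvHitB d stage item (j + 1)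
      else pvMapOne d stage item j

def map_with_stage_prefix_py_alt (items : List String) (prefix_map : List (String × Option String)) (stage : String) : List String :=
  let d := PySem.Dict.ofList prefix_map
  items.map (fun item => pvMapOne d stage item (PySem.Str.len item).toNat)

-- ===== PRECONDITION & SPEC =====
def Spec_map_with_stage_prefix_py (items : List String) (prefix_map : List (String × Option String)) (stage : String) (out : List String) : Prop := out = map_with_stage_prefix_py_alt items prefix_map stage
instance (items : List String) (prefix_map : List (String × Option String)) (stage : String) (out : List String) : Decidable (Spec_map_with_stage_prefix_py items prefix_map stage out) := by unfold Spec_map_with_stage_prefix_py; infer_instance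

-- ===== CLAIM (what is proved, stated in full; the proofs are below) =====
def Claim_equal_map_with_stage_prefix_py : Prop := ∀ (items : List String) (prefix_map : List (String × Option String)) (stage : String), Dom_map_with_stage_prefix_py items prefix_map stage → Spec_map_with_stage_prefix_py items prefix_map stage (map_with_stage_prefix_py items prefix_map stage)

-- ===== LEMMAS AND PROOFS =====

-- item[:i] as a list of characters
lemma pvTake_toList (item : String) (i : Nat) :
    (PySem.Str.slice item none (some (i : Int))).toList = item.toList.take i := by
  simp [PySem.Str.toList_slice, PySem.Chars.slice_eq_listSlice, PySem.List.slice_to_natCast]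

lemma pvLen_eq (s : String) : PySem.Str.len s = (s.toList.length : Int) := by
  simp [PySem.Str.len_eq]

lemma pvLen_take (item : String) (i : Nat) (h : i ≤ item.toList.length) :
    PySem.Str.len (PySem.Str.slice item none (some (i : Int))) = (i : Int) := by
  rw [pvLen_eq, pvTake_toList, List.length_take, Nat.min_eq_left h]


lemma pvStartswith_iff (item k : String) :
    PySem.Str.startswith item k = true ↔ k.toList <+: item.toList := by
  rw [PySem.Str.startswith_eq, PySem.Chars.startswith_iff]

-- a prefix of item of length i IS item[:i]
lemma pvPrefix_eq_take (item k : String) (h : k.toList <+: item.toList) :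
    PySem.Str.slice item none (some ((k.toList.length : Nat) : Int)) = k := by
  apply String.toList_inj.mp
  rw [pvTake_toList]
  exact (List.prefix_iff_eq_take.mp h).symm

-- A's scan returns the item unchanged when no key matches
lemma pvScanA_none (d : PySem.Dict String (Option String)) (stage item : String)
    (ks : List String) (h : ∀ k ∈ ks, PySem.Str.startswith item k = false) :
    pvScanA d stage item ks = item := by
  induction ks with
  | nil => rfl
  | cons k rest ih =>
      simp only [pvScanA, h k (by simp)]
      exact ih (fun k' hk' => h k' (by simp [hk']))

-- A's scan on a length-descending key list returns the hit of any maximal-length matching key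
lemma pvScanA_hit (d : PySem.Dict String (Option String)) (stage item : String)
    (ks : List String) (k₀ : String)
    (hp : ks.Pairwise (fun a b => PySem.Str.len b ≤ PySem.Str.len a))
    (hk₀ : k₀ ∈ ks) (hsw : PySem.Str.startswith item k₀ = true)
    (hmax : ∀ k ∈ ks, PySem.Str.startswith item k = true → PySem.Str.len k ≤ PySem.Str.len k₀) :
    pvScanA d stage item ks =
      stage ++ ((d.getD k₀ none).getD "") ++ PySem.Str.slice item (some (PySem.Str.len k₀)) none := by
  induction ks with
  | nil => cases hk₀
  | cons k rest ih =>
      by_cases hk : PySem.Str.startswith item k = true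
      · have hkk₀ : k = k₀ := by
          have h1 : PySem.Str.len k ≤ PySem.Str.len k₀ := hmax k (by simp) hk
          have h2 : PySem.Str.len k₀ ≤ PySem.Str.len k := by
            rcases List.mem_cons.mp hk₀ with h' | hk₀'
            · exact h' ▸ le_refl _
            · exact (List.pairwise_cons.mp hp).1 k₀ hk₀'
          have hlen : k.toList.length = k₀.toList.length := by
            have := le_antisymm h1 h2
            rw [pvLen_eq, pvLen_eq] at this
            exact_mod_cast this
          apply String.toList_inj.mp
          rw [List.prefix_iff_eq_take.mp (pvStartswith_iff item k |>.mp hk),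
              List.prefix_iff_eq_take.mp (pvStartswith_iff item k₀ |>.mp hsw), hlen]
        subst hkk₀
        simp only [pvScanA]
        rw [if_pos hk]
      · have hne : k₀ ≠ k := fun h => hk (h ▸ hsw)
        have hk₀'' : k₀ ∈ rest := by
          rcases List.mem_cons.mp hk₀ with h' | h'
          · exact absurd h' hne
          · exact h'
        have hkf : PySem.Str.startswith item k = false := by
          cases hsw' : PySem.Str.startswith item k
          · rfl
          · exact absurd hsw' hk
        simp only [pvScanA, hkf, Bool.false_eq_true, if_false]
        exact ih (List.pairwise_cons.mp hp).2 hk₀''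
          (fun k' hk' hsw' => hmax k' (by simp [hk']) hsw')

-- B's countdown returns the item unchanged when no prefix up to j is a key
lemma pvMapOne_none (d : PySem.Dict String (Option String)) (stage item : String) (j : Nat)
    (h : ∀ i ≤ j, d.contains (PySem.Str.slice item none (some (i : Int))) = false) :
    pvMapOne d stage item j = item := by
  induction j with
  | zero =>
      have h0 := h 0 (le_refl 0)
      norm_num at h0
      simp [pvMapOne, h0]
  | succ j ih =>
      have h1 := h (j + 1) (le_refl _)
      push_cast at h1
      simp only [pvMapOne, Nat.cast_add, Nat.cast_one, h1, Bool.false_eq_true, if_false]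
      exact ih (fun i hi => h i (Nat.le_succ_of_le hi))

-- B's countdown from j finds the greatest i ≤ j whose prefix is a key
lemma pvMapOne_hit (d : PySem.Dict String (Option String)) (stage item : String) (j i : Nat)
    (hij : i ≤ j)
    (hc : d.contains (PySem.Str.slice item none (some (i : Int))) = true)
    (hmax : ∀ i', i < i' → i' ≤ j → d.contains (PySem.Str.slice item none (some (i' : Int))) = false) :
    pvMapOne d stage item j = pvHitB d stage item i := by
  induction j with
  | zero =>
      have : i = 0 := Nat.le_zero.mp hij
      subst this
      norm_num at hc
      simp [pvMapOne, hc]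
  | succ j ih =>
      by_cases he : i = j + 1
      · subst he
        push_cast at hc
        simp only [pvMapOne, Nat.cast_add, Nat.cast_one, hc, if_true]
      · have hij' : i ≤ j := Nat.lt_succ_iff.mp (lt_of_le_of_ne hij he)
        have hcj : d.contains (PySem.Str.slice item none (some ((j + 1 : Nat) : Int))) = false :=
          hmax (j + 1) (Nat.lt_succ_of_le hij') (le_refl _)
        push_cast at hcj
        simp only [pvMapOne, Nat.cast_add, Nat.cast_one, hcj, Bool.false_eq_true, if_false]
        exact ih hij' (fun i' h1 h2 => hmax i' h1 (Nat.le_succ_of_le h2))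

-- the per-item equivalence: A's scan over a length-descending enumeration of d's keys
-- equals B's longest-prefix countdown
lemma pvPerItem (d : PySem.Dict String (Option String)) (stage item : String)
    (ks : List String)
    (hp : ks.Pairwise (fun a b => PySem.Str.len b ≤ PySem.Str.len a))
    (hmem : ∀ k, k ∈ ks ↔ k ∈ d.keys) :
    pvScanA d stage item ks = pvMapOne d stage item (PySem.Str.len item).toNat := by
  have hlen : (PySem.Str.len item).toNat = item.toList.length := by
    rw [pvLen_eq]; exact Int.toNat_natCast _
  set n := item.toList.length with hn
  rw [hlen]
  by_cases hex : ∃ i, i ≤ n ∧ d.contains (PySem.Str.slice item none (some (i : Int))) = true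
  · obtain ⟨iw, hiw, hcw⟩ := hex
    set P : Nat → Prop := fun i => d.contains (PySem.Str.slice item none (some (i : Int))) = true with hP
    set i₀ := Nat.findGreatest P n with hi₀
    have hPi₀ : P i₀ := Nat.findGreatest_spec hiw hcw
    have hi₀n : i₀ ≤ n := Nat.findGreatest_le n
    have hgt : ∀ i', i₀ < i' → i' ≤ n → ¬ P i' := fun i' h1 h2 => Nat.findGreatest_is_greatest h1 h2
    set k₀ := PySem.Str.slice item none (some (i₀ : Int)) with hk₀
    have hk₀list : k₀.toList = item.toList.take i₀ := pvTake_toList item i₀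
    have hk₀len : PySem.Str.len k₀ = (i₀ : Int) := pvLen_take item i₀ hi₀n
    have hsw : PySem.Str.startswith item k₀ = true := by
      rw [pvStartswith_iff, hk₀list]; exact List.take_prefix i₀ item.toList
    have hA := pvScanA_hit d stage item ks k₀ hp
      ((hmem k₀).mpr ((PySem.Dict.contains_iff_mem_keys d k₀).mp hPi₀))
      hsw
      (by
        intro k hk hswk
        have hpref := (pvStartswith_iff item k).mp hswk
        have hmle : k.toList.length ≤ n := hpref.length_le
        have hkeq : PySem.Str.slice item none (some ((k.toList.length : Nat) : Int)) = k :=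
          pvPrefix_eq_take item k hpref
        have hPk : P k.toList.length := by
          rw [hP]; dsimp only; rw [hkeq]
          exact (PySem.Dict.contains_iff_mem_keys d k).mpr ((hmem k).mp hk)
        have hle : k.toList.length ≤ i₀ := by
          by_contra hlt
          exact hgt k.toList.length (Nat.lt_of_not_le hlt) hmle hPk
        rw [pvLen_eq, hk₀len]
        exact_mod_cast hle)
    have hB := pvMapOne_hit d stage item n i₀ hi₀n hPi₀
      (fun i' h1 h2 => by
        have hne := hgt i' h1 h2
        rw [hP] at hne; dsimp only at hne
        simpa using hne)
    rw [hA, hB, pvHitB, hk₀len]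
  · push Not at hex
    have hno : ∀ i ≤ n, d.contains (PySem.Str.slice item none (some (i : Int))) = false := by
      intro i hi
      by_contra h
      exact (hex i hi) (by simpa using h)
    rw [pvMapOne_none d stage item n hno]
    apply pvScanA_none
    intro k hk
    by_contra h
    have hswk : PySem.Str.startswith item k = true := by simpa using h
    have hpref := (pvStartswith_iff item k).mp hswk
    have hkeq := pvPrefix_eq_take item k hpref
    have := hno k.toList.length hpref.length_le
    rw [hkeq] at this
    rw [(PySem.Dict.contains_iff_mem_keys d k).mpr ((hmem k).mp hk)] at this
    cases this

-- ===== VERDICT (by name: the statement is the Claim_ definition above) =====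
theorem map_with_stage_prefix_py_spec : Claim_equal_map_with_stage_prefix_py := by
  intro items prefix_map stage _
  unfold Spec_map_with_stage_prefix_py map_with_stage_prefix_py map_with_stage_prefix_py_alt
  simp only [PySem.List.foldl_append_singleton_eq_map, List.nil_append]
  apply List.map_congr_left
  intro item _
  exact pvPerItem _ stage item _
    (PySem.List.sorted_pairwise_rev _ _)
    (fun k => PySem.List.mem_sorted _ _ _ _)
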